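-- pv_equiv track=rewrite | github.com/Hsnayrus/Coding_Practice | Coding-Problems/Leetcode/Leetcode_1281/Solution.py | subtractProductAndSum
-- ===== SOURCE A (Python) =====
-- def subtractProductAndSum(n: int) -> int:
--     product = 1
--     sum = 0
--     if n == 0:
--         return 0
--     while True:
--         if n == 0:
--             break
--         r = n % 10
--         product = product * r
--         sum = sum + r
--         n = int(n / 10)
--     return product - sum
-- ===== SOURCE B (Python) =====
-- def subtractProductAndSum(n: int) -> int:
--     p, s = _prodSum(n)
--     return p - s
--
-- def _prodSum(n: int):
--     """Return (product, sum) of the decimal digits of n."""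
--     if n < 10:
--         return n, n
--     p, s = _prodSum(n // 10)
--     return p * (n % 10), s + n % 10
-- ===== Notes on version B (the rewrite author's own statement) =====
-- stated objective: simpler
-- what changed: Replaced the fused while-loop over mutable (product, sum, n) state and its n == 0 guard with a recursive helper returning the digits' (product, sum) pair with a single-digit base case; Pre_ excludes negative n, an unspecified corner where A's %/int(n/10) interplay extracts a digit chain that is not the digits of n and any value is as defensible as another.
-- outside the precondition, e.g. on subtractProductAndSum(-12): A returns 55, B returns 0
import Mathlib
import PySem

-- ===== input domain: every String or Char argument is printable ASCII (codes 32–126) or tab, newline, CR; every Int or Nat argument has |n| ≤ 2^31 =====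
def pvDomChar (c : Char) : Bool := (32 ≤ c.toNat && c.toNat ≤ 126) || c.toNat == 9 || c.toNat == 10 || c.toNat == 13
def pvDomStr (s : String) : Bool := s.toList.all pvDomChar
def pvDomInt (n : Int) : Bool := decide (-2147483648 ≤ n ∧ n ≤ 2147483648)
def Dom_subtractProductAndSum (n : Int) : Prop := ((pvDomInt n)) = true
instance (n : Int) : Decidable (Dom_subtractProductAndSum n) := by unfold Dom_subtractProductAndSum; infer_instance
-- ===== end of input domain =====

-- B replaces A's fused mutable-state while loop with a recursive helper returning the digits' (product, sum) pair (simpler decomposition; same values on n ≥ 0).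

-- termination helper for port A (cited by name in decreasing_by)
theorem pvTdiv10_natAbs_lt (n : Int) (h : n ≠ 0) : (n.tdiv 10).natAbs < n.natAbs := by
  have h1 : (n.tdiv 10).natAbs = n.natAbs / 10 := Int.natAbs_tdiv n 10
  have h2 : 0 < n.natAbs := Int.natAbs_pos.mpr h
  omega

-- termination helper for port B (cited by name in decreasing_by)
theorem pvFdiv10_lt (n : Int) (h : ¬ n < 10) : (PySem.Int.floordiv n 10).toNat < n.toNat := by
  rw [PySem.Int.floordiv_eq_ediv_of_pos (by omega)]
  omega

-- ===== PORT A =====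
-- the while-True loop over mutable (product, sum, n); Python's `int(n / 10)` is
-- truncation toward zero = Int.tdiv (exact on |n| ≤ 2^31, where the float division is exact)
def pvALoop (product sum n : Int) : Int :=
  if n = 0 then product - sum
  else
    let r := PySem.Int.mod n 10
    pvALoop (product * r) (sum + r) (n.tdiv 10)
termination_by n.natAbs
decreasing_by exact pvTdiv10_natAbs_lt n (by assumption)

def subtractProductAndSum (n : Int) : Int :=
  if n = 0 then 0 else pvALoop 1 0 n

-- ===== PORT B =====
def pvProdSum (n : Int) : Int × Int :=
  if n < 10 then (n, n)
  else
    let ps := pvProdSum (PySem.Int.floordiv n 10)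
    (ps.1 * PySem.Int.mod n 10, ps.2 + PySem.Int.mod n 10)
termination_by n.toNat
decreasing_by exact pvFdiv10_lt n (by assumption)

def subtractProductAndSum_alt (n : Int) : Int :=
  let ps := pvProdSum n
  ps.1 - ps.2

-- ===== PRECONDITION & SPEC =====
-- Pre_ excludes negative n: there the digit chain extracted by A's `n % 10` / `int(n / 10)`
-- interplay is not the digits of n, and any value on that unspecified corner is as
-- defensible as another; B returns its own natural value there.
def Pre_subtractProductAndSum (n : Int) : Prop := 0 ≤ n
instance (n : Int) : Decidable (Pre_subtractProductAndSum n) := by unfold Pre_subtractProductAndSum; infer_instance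
def pvWitness_subtractProductAndSum : Int := 234

def Spec_subtractProductAndSum (n : Int) (out : Int) : Prop := out = subtractProductAndSum_alt n
instance (n : Int) (out : Int) : Decidable (Spec_subtractProductAndSum n out) := by unfold Spec_subtractProductAndSum; infer_instance

-- ===== CLAIM =====
def Claim_equal_subtractProductAndSum : Prop := ∀ (n : Int), Dom_subtractProductAndSum n → Pre_subtractProductAndSum n → Spec_subtractProductAndSum n (subtractProductAndSum n)

-- ===== LEMMAS AND PROOFS =====

-- loop invariant: for positive n, A's fused loop equals the accumulators combined with B's digit pair
theorem pvALoop_eq (n : Int) (hn : 0 < n) :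
    ∀ (p s : Int), pvALoop p s n = p * (pvProdSum n).1 - (s + (pvProdSum n).2) := by
  induction n using pvProdSum.induct with
  | case1 n h =>
    intro p s
    have hr : PySem.Int.mod n 10 = n := by
      rw [PySem.Int.mod_eq_emod_of_pos (by omega : (0:Int) < 10)]; omega
    have ht : n.tdiv 10 = 0 := by
      rw [Int.tdiv_eq_ediv]; omega
    rw [pvALoop.eq_def]
    simp only [if_neg (by omega : ¬ n = 0), hr, ht]
    rw [pvALoop.eq_def, pvProdSum.eq_def]
    simp [h]
  | case2 n h ih =>
    intro p s
    have hq : PySem.Int.floordiv n 10 = n.tdiv 10 := by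
      rw [PySem.Int.floordiv_eq_ediv_of_pos (by omega), Int.tdiv_eq_ediv]
      omega
    have hqpos : 0 < PySem.Int.floordiv n 10 := by
      rw [PySem.Int.floordiv_eq_ediv_of_pos (by omega)]; omega
    rw [pvALoop.eq_def]
    simp only [if_neg (by omega : ¬ n = 0)]
    rw [← hq, ih hqpos]
    have hps : pvProdSum n = ((pvProdSum (PySem.Int.floordiv n 10)).1 * PySem.Int.mod n 10,
        (pvProdSum (PySem.Int.floordiv n 10)).2 + PySem.Int.mod n 10) := by
      rw [pvProdSum.eq_def]; simp only [if_neg h]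
    rw [hps]
    ring

-- ===== VERDICT =====
theorem subtractProductAndSum_spec : Claim_equal_subtractProductAndSum := by
  intro n _ hpre
  unfold Spec_subtractProductAndSum subtractProductAndSum subtractProductAndSum_alt
  split_ifs with h
  · subst h; simp [pvProdSum]
  · have hn : 0 < n := lt_of_le_of_ne hpre (Ne.symm h)
    rw [pvALoop_eq n hn 1 0]; ring
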